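-- pv_equiv track=rewrite | github.com/XS-MLVP/mlvp | scripts/bundle_code_gen.py | __gen_bundle_code
-- ===== SOURCE A (Python) =====
-- def __gen_bundle_code(bundle_name: str, signals, max_width: int):
--     """
--     Generates bundle code using a list of signals.
--
--     Args:
--         bundle_name: The name of the bundle.
--         signals: The list of signals.
--         max_width: The maximum width of the line.
--
--     Returns:
--         The bundle code.
--     """
--
--     signals_num = len(signals)
--
--     if signals_num == 0:
--         end_code = f" = Signal()"
--     else:
--         end_code = f" = Signals({signals_num})"
--
--     code = f"from toffee import Bundle\nfrom toffee import Signals, Signal\n\nclass {bundle_name}(Bundle):\n"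
--     code_line = "\t"
--     index = 0
--
--     TAB_SIZE = 4
--     while index < signals_num:
--         code_line = "\t"
--
--         code_line += f"{signals[index]}, "
--         current_width = TAB_SIZE + len(signals[index]) + 2 + 1
--         index += 1
--
--         while index < signals_num and current_width + len(signals[index]) + 2 <= max_width:
--             code_line += f"{signals[index]}, "
--             current_width += len(signals[index]) + 2
--             index += 1
--
--         if index == signals_num:
--             code_line = code_line[:-2]
--             current_width -= 3
--
--             if current_width + len(end_code) <= max_width:
--                 code_line += end_code + "\n"
--             else:
--                 code_line += " \\\n\t" + end_code[1:] + "\n"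
--         else:
--             code_line += "\\\n"
--
--         code += code_line
--
--     return code
-- ===== SOURCE B (Python) =====
-- def __gen_bundle_code(bundle_name: str, signals, max_width: int):
--     """Two-pass variant: first greedily partition signals into line groups
--     (tracking each group's width), then render the groups."""
--     n = len(signals)
--     header = ("from toffee import Bundle\nfrom toffee import Signals, Signal\n\n"
--               f"class {bundle_name}(Bundle):\n")
--     end_code = " = Signal()" if n == 0 else f" = Signals({n})"
--
--     # pass 1: partition into (group, width) pairs
--     groups = []
--     i = 0
--     while i < n:
--         w = 4 + len(signals[i]) + 2 + 1
--         j = i + 1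
--         while j < n and w + len(signals[j]) + 2 <= max_width:
--             w += len(signals[j]) + 2
--             j += 1
--         groups.append((signals[i:j], w))
--         i = j
--
--     # pass 2: render each group as one source line
--     lines = []
--     for k, (g, w) in enumerate(groups):
--         body = ", ".join(g)
--         if k < len(groups) - 1:
--             lines.append("\t" + body + ", \\\n")
--         else:
--             w -= 3
--             if w + len(end_code) <= max_width:
--                 lines.append("\t" + body + end_code + "\n")
--             else:
--                 lines.append("\t" + body + " \\\n\t" + end_code[1:] + "\n")
--     return header + "".join(lines)
-- ===== Notes on version B (the rewrite author's own statement) =====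
-- stated objective: faster
-- what changed: Replaced A's single while-loop that interleaves width tracking with repeated string concatenation (code += code_line) by a two-pass design: first greedily partition the signals into (group, width) pairs, then render each group line with ', '.join and assemble the output with one final ''.join.
import Mathlib
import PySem

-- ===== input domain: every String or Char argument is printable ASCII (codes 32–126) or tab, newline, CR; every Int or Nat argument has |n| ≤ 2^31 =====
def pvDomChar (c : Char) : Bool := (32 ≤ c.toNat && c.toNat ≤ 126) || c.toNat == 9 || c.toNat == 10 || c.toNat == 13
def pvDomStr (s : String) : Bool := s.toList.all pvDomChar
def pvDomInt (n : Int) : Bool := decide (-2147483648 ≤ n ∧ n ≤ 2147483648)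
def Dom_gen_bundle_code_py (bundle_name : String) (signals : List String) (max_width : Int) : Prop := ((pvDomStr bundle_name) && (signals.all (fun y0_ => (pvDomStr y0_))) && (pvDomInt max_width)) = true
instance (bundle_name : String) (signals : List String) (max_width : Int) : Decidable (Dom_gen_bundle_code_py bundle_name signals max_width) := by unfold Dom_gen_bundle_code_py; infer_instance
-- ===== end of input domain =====

-- B re-decomposes A into two passes (greedy partition into line groups, then render/join them), avoiding A's repeated string concatenation; return values proved equal on all inputs.

-- ===== PORT A =====
-- A's inner while-loop: extend the current code line while the next signal fits.
-- state: (code_line, current_width, remaining signals); returns the state when the loop stops.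
def aInner (mw : Int) (line : List Char) (cw : Int) : List (List Char) → (List Char × Int × List (List Char))
  | [] => (line, cw, [])
  | s :: t =>
    if cw + (s.length : Int) + 2 ≤ mw then
      aInner mw (line ++ s ++ (", ").toList) (cw + (s.length : Int) + 2) t
    else (line, cw, s :: t)

-- needed only for aOuter's termination
theorem aInner_rest_le (mw : Int) (rest : List (List Char)) : ∀ line cw, (aInner mw line cw rest).2.2.length ≤ rest.length := by
  induction rest with
  | nil => intro line cw; simp [aInner]
  | cons s t ih =>
    intro line cw
    simp only [aInner]
    split
    · exact le_trans (ih _ _) (Nat.le_succ _)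
    · exact le_refl _

-- A's outer while-loop over the remaining signals (index replaced by the suffix).
def aOuter (mw : Int) (ec : List Char) : List (List Char) → List Char
  | [] => []
  | s :: t =>
    let line0 := ('\t').toString.toList ++ s ++ (", ").toList
    let cw0 : Int := 4 + (s.length : Int) + 2 + 1
    let r := aInner mw line0 cw0 t
    if _h : r.2.2 = [] then
      -- code_line = code_line[:-2]; current_width -= 3
      let line' := PySem.List.slice r.1 none (some (-2))
      let cw' := r.2.1 - 3
      if cw' + (ec.length : Int) ≤ mw then line' ++ ec ++ ['\n']
      else line' ++ (" \\\n\t").toList ++ PySem.List.slice ec (some 1) none ++ ['\n']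
    else r.1 ++ ("\\\n").toList ++ aOuter mw ec r.2.2
  termination_by rest => rest.length
  decreasing_by
    have := aInner_rest_le mw t (('\t').toString.toList ++ s ++ (", ").toList) (4 + (s.length : Int) + 2 + 1)
    simp only [List.length_cons]
    omega

def gen_bundle_code_py (bundle_name : String) (signals : List String) (max_width : Int) : String :=
  let sigs := signals.map String.toList
  let signals_num := sigs.length
  let end_code : List Char :=
    if signals_num = 0 then (" = Signal()").toList
    else (" = Signals(").toList ++ PySem.Int.toChars (signals_num : Int) ++ (")").toList
  let code := ("from toffee import Bundle\nfrom toffee import Signals, Signal\n\nclass ").toList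
              ++ bundle_name.toList ++ ("(Bundle):\n").toList
  String.ofList (code ++ aOuter max_width end_code sigs)

-- ===== PORT B =====
-- B's inner loop of pass 1: collect the signals that fit onto the current line, tracking the width.
def bGrow (mw : Int) (acc : List (List Char)) (w : Int) : List (List Char) → (List (List Char) × Int × List (List Char))
  | [] => (acc, w, [])
  | s :: t =>
    if w + (s.length : Int) + 2 ≤ mw then bGrow mw (acc ++ [s]) (w + (s.length : Int) + 2) t
    else (acc, w, s :: t)

-- needed only for bPartition's termination
theorem bGrow_rest_le (mw : Int) (rest : List (List Char)) : ∀ acc w, (bGrow mw acc w rest).2.2.length ≤ rest.length := by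
  induction rest with
  | nil => intro acc w; simp [bGrow]
  | cons s t ih =>
    intro acc w
    simp only [bGrow]
    split
    · exact le_trans (ih _ _) (Nat.le_succ _)
    · exact le_refl _

-- pass 1: greedy partition into (group, width) pairs
def bPartition (mw : Int) : List (List Char) → List (List (List Char) × Int)
  | [] => []
  | s :: t =>
    let r := bGrow mw [] (4 + (s.length : Int) + 2 + 1) t
    (s :: r.1, r.2.1) :: bPartition mw r.2.2
  termination_by rest => rest.length
  decreasing_by
    have := bGrow_rest_le mw t [] (4 + (s.length : Int) + 2 + 1)
    simp only [List.length_cons]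
    omega

-- pass 2: render each group; the last group carries end_code
def bRender (mw : Int) (ec : List Char) : List (List (List Char) × Int) → List Char
  | [] => []
  | [(g, w)] =>
    let body := PySem.Chars.join (", ").toList g
    if (w - 3) + (ec.length : Int) ≤ mw then ('\t').toString.toList ++ body ++ ec ++ ['\n']
    else ('\t').toString.toList ++ body ++ (" \\\n\t").toList ++ ec.tail ++ ['\n']
  | (g, _) :: gr => ('\t').toString.toList ++ PySem.Chars.join (", ").toList g ++ (", \\\n").toList ++ bRender mw ec gr

def gen_bundle_code_py_alt (bundle_name : String) (signals : List String) (max_width : Int) : String :=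
  let sigs := signals.map String.toList
  let n := sigs.length
  let header := ("from toffee import Bundle\nfrom toffee import Signals, Signal\n\nclass ").toList
                ++ bundle_name.toList ++ ("(Bundle):\n").toList
  let end_code : List Char :=
    if n = 0 then (" = Signal()").toList
    else (" = Signals(").toList ++ PySem.Int.toChars (n : Int) ++ (")").toList
  String.ofList (header ++ bRender max_width end_code (bPartition max_width sigs))

-- ===== PRECONDITION & SPEC =====
def Spec_gen_bundle_code_py (bundle_name : String) (signals : List String) (max_width : Int) (out : String) : Prop := out = gen_bundle_code_py_alt bundle_name signals max_width
instance (bundle_name : String) (signals : List String) (max_width : Int) (out : String) : Decidable (Spec_gen_bundle_code_py bundle_name signals max_width out) := by unfold Spec_gen_bundle_code_py; infer_instance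

-- ===== CLAIM (what is proved, stated in full; the proofs are below) =====
def Claim_equal_gen_bundle_code_py : Prop := ∀ (bundle_name : String) (signals : List String) (max_width : Int), Dom_gen_bundle_code_py bundle_name signals max_width → Spec_gen_bundle_code_py bundle_name signals max_width (gen_bundle_code_py bundle_name signals max_width)

-- ===== LEMMAS AND PROOFS =====

theorem bGrow_shift (mw : Int) (rest : List (List Char)) : ∀ acc w,
    bGrow mw acc w rest = (acc ++ (bGrow mw [] w rest).1, (bGrow mw [] w rest).2) := by
  induction rest with
  | nil => intro acc w; simp [bGrow]
  | cons s t ih =>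
    intro acc w
    simp only [bGrow]
    split
    · simp only [List.nil_append]
      rw [ih (acc ++ [s]), ih [s]]
      simp
    · simp

-- A's inner loop, characterised by B's group-collector
theorem aInner_eq (mw : Int) (rest : List (List Char)) : ∀ line w,
    aInner mw line w rest =
      (line ++ ((bGrow mw [] w rest).1).flatMap (fun s => s ++ (", ").toList),
       (bGrow mw [] w rest).2) := by
  induction rest with
  | nil => intro line w; simp [aInner, bGrow]
  | cons s t ih =>
    intro line w
    simp only [aInner, bGrow]
    split
    · simp only [List.nil_append]
      rw [ih, bGrow_shift mw t [s]]
      simp [List.append_assoc]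
    · simp

theorem flatMap_sep (g : List (List Char)) (hg : g ≠ []) :
    g.flatMap (fun s => s ++ (", ").toList)
      = PySem.Chars.join (", ").toList g ++ (", ").toList := by
  induction g with
  | nil => exact absurd rfl hg
  | cons s t ih =>
    cases t with
    | nil => simp [PySem.Chars.join_singleton]
    | cons u v =>
      rw [PySem.Chars.join_cons_cons]
      simp only [List.flatMap_cons] at ih ⊢
      rw [ih (by simp)]
      simp

-- dropping the trailing ", " from the flatMap recovers the join
theorem slice_flatMap (pre : List Char) (g : List (List Char)) (hg : g ≠ []) :
    PySem.List.slice (pre ++ g.flatMap (fun s => s ++ (", ").toList)) none (some (-2))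
      = pre ++ PySem.Chars.join (", ").toList g := by
  rw [PySem.List.slice_to_neg_ofNat _ 2 (by omega), flatMap_sep g hg]
  have h1 : (", ").toList = [',', ' '] := rfl
  rw [h1, ← List.append_assoc]
  have h2 : (pre ++ PySem.Chars.join [',', ' '] g ++ [',', ' ']).length - 2
      = (pre ++ PySem.Chars.join [',', ' '] g).length := by simp; omega
  rw [h2, List.take_left]

-- the outer loops agree (fuel-indexed induction on the suffix length)
theorem outer_eq (mw : Int) (ec : List Char) : ∀ (n : Nat) (sigs : List (List Char)), sigs.length ≤ n →
    aOuter mw ec sigs = bRender mw ec (bPartition mw sigs) := by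
  intro n
  induction n with
  | zero =>
    intro sigs h
    have hnil : sigs = [] := List.eq_nil_of_length_eq_zero (Nat.le_zero.mp h)
    subst hnil
    simp [aOuter, bPartition, bRender]
  | succ n ih =>
    intro sigs h
    match sigs with
    | [] => simp [aOuter, bPartition, bRender]
    | s :: t =>
      rw [aOuter, bPartition]
      simp only [aInner_eq]
      rcases hbg : bGrow mw [] (4 + (s.length : Int) + 2 + 1) t with ⟨g, w, rest⟩
      dsimp only
      by_cases hrest : rest = []
      · subst hrest
        rw [dif_pos rfl, bPartition]
        have hline : ('\t').toString.toList ++ s ++ (", ").toList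
              ++ g.flatMap (fun s => s ++ (", ").toList)
            = ('\t').toString.toList ++ (s :: g).flatMap (fun s => s ++ (", ").toList) := by
          simp [List.append_assoc]
        rw [hline, slice_flatMap _ _ (List.cons_ne_nil s g)]
        simp only [bRender, PySem.List.slice_from_one]
      · rw [dif_neg hrest]
        have hlen : rest.length ≤ n := by
          have h1 := bGrow_rest_le mw t [] (4 + (s.length : Int) + 2 + 1)
          rw [hbg] at h1
          simp at h h1
          omega
        rw [ih rest hlen]
        rcases rest with _ | ⟨x, xs⟩
        · exact absurd rfl hrest
        rw [bPartition]
        cases hbp : bGrow mw [] (4 + (x.length : Int) + 2 + 1) xs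
        simp only [bRender]
        have hsep : s ++ (", ").toList ++ g.flatMap (fun s => s ++ (", ").toList)
            = PySem.Chars.join (", ").toList (s :: g) ++ (", ").toList := by
          have := flatMap_sep (s :: g) (List.cons_ne_nil s g)
          simp only [List.flatMap_cons] at this
          exact this
        rw [List.append_assoc ('\t').toString.toList, List.append_assoc _ _ (g.flatMap _), hsep]
        simp [List.append_assoc]

-- ===== VERDICT (by name: the statement is the Claim_ definition above) =====
theorem gen_bundle_code_py_spec : Claim_equal_gen_bundle_code_py := by
  intro bundle_name signals max_width _
  unfold Spec_gen_bundle_code_py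
  simp only [gen_bundle_code_py, gen_bundle_code_py_alt]
  rw [outer_eq max_width _ (signals.map String.toList).length _ (le_refl _)]
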